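-- pv_equiv track=rewrite | github.com/GranusClarvis/clarvis | scripts/agents/project_agent.py | _dedup_procedures
-- ===== SOURCE A (Python) =====
-- _PROC_ALWAYS_REDUNDANT = {
--     "git workflow", "git workflow (critical", "communication", "notes", "note",
-- }
--
-- _PROC_REDUNDANT_IF_CI = {
--     "build & test", "build", "testing",
-- }
--
-- def _dedup_procedures(raw: str, has_ci_context: bool = False) -> str:
--     """Strip sections from procedures.md that duplicate other prompt sections.
--
--     Always removed: Git Workflow, Communication, Notes (hardcoded in prompt).
--     Removed when CI context present: Build & Test, Testing (in CI Commands).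
--     """
--     redundant = _PROC_ALWAYS_REDUNDANT | (_PROC_REDUNDANT_IF_CI if has_ci_context else set())
--     lines = raw.split("\n")
--     result = []
--     skip = False
--     for line in lines:
--         stripped = line.strip().lower()
--         if stripped.startswith("## "):
--             heading = stripped[3:].strip().rstrip(")")
--             skip = any(heading.startswith(r) for r in redundant)
--         if not skip:
--             result.append(line)
--     return "\n".join(result).strip()
-- ===== SOURCE B (Python) =====
-- _PROC_ALWAYS_REDUNDANT = {
--     "git workflow", "git workflow (critical", "communication", "notes", "note",
-- }
--
-- _PROC_REDUNDANT_IF_CI = {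
--     "build & test", "build", "testing",
-- }
--
-- def _is_heading(line):
--     return line.strip().lower().startswith("## ")
--
-- def _dedup_procedures(raw: str, has_ci_context: bool = False) -> str:
--     """Section-based rewrite: split into sections at headings, drop redundant ones."""
--     redundant = _PROC_ALWAYS_REDUNDANT | (_PROC_REDUNDANT_IF_CI if has_ci_context else set())
--     sections = []
--     cur = []
--     for line in raw.split("\n"):
--         if _is_heading(line):
--             sections.append(cur)
--             cur = [line]
--         else:
--             cur.append(line)
--     sections.append(cur)
--     kept = []
--     for sec in sections:
--         if sec and _is_heading(sec[0]):
--             heading = sec[0].strip().lower()[3:].strip().rstrip(")")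
--             if any(heading.startswith(r) for r in redundant):
--                 continue
--         kept.extend(sec)
--     return "\n".join(kept).strip()
-- ===== Notes on version B (the rewrite author's own statement) =====
-- stated objective: alternative
-- what changed: Replaces the line-by-line scan with a sticky skip flag by a two-phase decomposition: partition the lines into sections at headings, then filter whole sections by their heading and concatenate the survivors.
import Mathlib
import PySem

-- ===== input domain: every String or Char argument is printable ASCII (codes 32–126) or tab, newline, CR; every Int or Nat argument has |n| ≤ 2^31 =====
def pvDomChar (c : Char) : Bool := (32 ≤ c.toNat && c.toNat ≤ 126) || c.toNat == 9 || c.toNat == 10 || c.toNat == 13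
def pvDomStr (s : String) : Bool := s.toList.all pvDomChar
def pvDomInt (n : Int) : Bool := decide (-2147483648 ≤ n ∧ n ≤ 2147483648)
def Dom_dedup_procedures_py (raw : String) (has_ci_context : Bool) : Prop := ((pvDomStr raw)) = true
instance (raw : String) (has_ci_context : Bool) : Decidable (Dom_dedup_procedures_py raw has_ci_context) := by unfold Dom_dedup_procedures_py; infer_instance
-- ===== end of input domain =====

-- B restructures A's single scan with a sticky skip flag into section partitioning + whole-section
-- filtering (alternative decomposition, same cost); return values proved equal on all inputs.

-- Shared context (both Pythons use the same module constants and heading normalization):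
-- the redundant prefixes; membership test via a boolean 'any', so list order is immaterial.
def pvRedundant (has_ci_context : Bool) : List (List Char) :=
  (["git workflow", "git workflow (critical", "communication", "notes", "note"].map String.toList) ++
  (if has_ci_context then ["build & test", "build", "testing"].map String.toList else [])

-- heading = stripped[3:].strip().rstrip(")"); rstrip(")") ported by hand (drop trailing ')' chars — exact)
def pvHeadingOf (stripped : List Char) : List Char :=
  ((PySem.Chars.strip (PySem.List.slice stripped (some 3) none)).reverse.dropWhile (· == ')')).reverse

def pvIsRedundant (red : List (List Char)) (stripped : List Char) : Bool :=
  red.any (fun r => PySem.Chars.startswith (pvHeadingOf stripped) r)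

-- ===== PORT A =====
-- A's loop: one pass over the lines carrying the sticky 'skip' flag
def pvALoop (red : List (List Char)) : List String → Bool → List String
  | [], _ => []
  | l :: ls, skip =>
    let stripped := PySem.Chars.lower (PySem.Chars.strip l.toList)
    let skip' := if PySem.Chars.startswith stripped "## ".toList
                 then pvIsRedundant red stripped else skip
    (if skip' then [] else [l]) ++ pvALoop red ls skip'

def dedup_procedures_py (raw : String) (has_ci_context : Bool) : String :=
  PySem.Str.strip (PySem.Str.join "\n"
    (pvALoop (pvRedundant has_ci_context) ((PySem.Chars.splitOn raw.toList "\n".toList).map String.ofList) false))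

-- ===== PORT B =====
def pvIsHeading (l : String) : Bool :=
  PySem.Chars.startswith (PySem.Chars.lower (PySem.Chars.strip l.toList)) "## ".toList

-- phase 1: partition the lines into sections, a new section at each heading line
def pvGroup : List String → List String → List (List String)
  | [], cur => [cur]
  | l :: ls, cur => if pvIsHeading l then cur :: pvGroup ls [l] else pvGroup ls (cur ++ [l])

-- a section is dropped iff it starts with a heading whose normalized text matches a redundant prefix
def pvDropSec (red : List (List Char)) : List String → Bool
  | [] => false
  | l :: _ => pvIsHeading l &&
      pvIsRedundant red (PySem.Chars.lower (PySem.Chars.strip l.toList))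

def dedup_procedures_py_alt (raw : String) (has_ci_context : Bool) : String :=
  let red := pvRedundant has_ci_context
  let sections := pvGroup ((PySem.Chars.splitOn raw.toList "\n".toList).map String.ofList) []
  let kept := sections.foldl (fun acc sec => if pvDropSec red sec then acc else acc ++ sec) []
  PySem.Str.strip (PySem.Str.join "\n" kept)

-- ===== PRECONDITION & SPEC =====
def Spec_dedup_procedures_py (raw : String) (has_ci_context : Bool) (out : String) : Prop := out = dedup_procedures_py_alt raw has_ci_context
instance (raw : String) (has_ci_context : Bool) (out : String) : Decidable (Spec_dedup_procedures_py raw has_ci_context out) := by unfold Spec_dedup_procedures_py; infer_instance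

-- ===== CLAIM (what is proved, stated in full; the proofs are below) =====
def Claim_equal_dedup_procedures_py : Prop := ∀ (raw : String) (has_ci_context : Bool), Dom_dedup_procedures_py raw has_ci_context → Spec_dedup_procedures_py raw has_ci_context (dedup_procedures_py raw has_ci_context)

-- ===== LEMMAS AND PROOFS =====

theorem pvDropSec_append (red : List (List Char)) (cur : List String) (l : String)
    (h : pvIsHeading l = false) : pvDropSec red (cur ++ [l]) = pvDropSec red cur := by
  cases cur with
  | nil => simp [pvDropSec, h]
  | cons c cs => simp [pvDropSec]

theorem pvMain (red : List (List Char)) (ls : List String) :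
    ∀ cur, (pvGroup ls cur).flatMap (fun s => if pvDropSec red s then [] else s)
      = (if pvDropSec red cur then [] else cur) ++ pvALoop red ls (pvDropSec red cur) := by
  induction ls with
  | nil => intro cur; simp [pvGroup, pvALoop]
  | cons l ls ih =>
    intro cur
    by_cases h : PySem.Chars.startswith (PySem.Chars.lower (PySem.Chars.strip l.toList)) "## ".toList = true
    · have hh : pvIsHeading l = true := by simpa [pvIsHeading] using h
      simp only [pvGroup, hh, if_true, List.flatMap_cons, ih, pvALoop, h]
      have hs : pvDropSec red [l] = pvIsRedundant red (PySem.Chars.lower (PySem.Chars.strip l.toList)) := by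
        simp [pvDropSec, hh]
      rw [hs]
    · have hh : pvIsHeading l = false := by simpa [pvIsHeading] using h
      have h' : PySem.Chars.startswith (PySem.Chars.lower (PySem.Chars.strip l.toList)) "## ".toList = false := by
        simpa using h
      simp only [pvGroup, hh, Bool.false_eq_true, if_false, ih, pvDropSec_append red cur l hh,
        pvALoop, h']
      by_cases hd : pvDropSec red cur = true <;> simp [hd]

-- ===== VERDICT (by name: the statement is the Claim_ definition above) =====
theorem dedup_procedures_py_spec : Claim_equal_dedup_procedures_py := by
  intro raw has_ci _
  unfold Spec_dedup_procedures_py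
  simp only [dedup_procedures_py, dedup_procedures_py_alt]
  rw [PySem.List.foldl_congr_mem _ _ (fun acc sec =>
        acc ++ (if pvDropSec (pvRedundant has_ci) sec then [] else sec)) _
      (by intro acc x _; by_cases hx : pvDropSec (pvRedundant has_ci) x = true <;> simp [hx])]
  rw [PySem.List.foldl_append_eq_flatMap]
  rw [pvMain]
  simp [pvDropSec]
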